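-- pv_equiv track=rewrite | github.com/aws/lex-helper | scripts/check-spelling.py | _should_skip_word
-- ===== SOURCE A (Python) =====
-- def _should_skip_word(word: str) -> bool:
--     """Check if word should be skipped from spell checking."""
--     # Skip very short words
--     if len(word) < 3:
--         return True
--
--     # Skip words that are all uppercase (likely acronyms)
--     if word.isupper() and len(word) > 1:
--         return True
--
--     # Skip words with numbers
--     if any(c.isdigit() for c in word):
--         return True
--
--     # Skip words with underscores or hyphens (likely code)
--     if "_" in word or "-" in word:
--         return True
--
--     # Skip words that look like file paths or URLs
--     if "/" in word or "\\" in word or "." in word: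
--         return True
--
--     return False
-- ===== SOURCE B (Python) =====
-- def _should_skip_word(word: str) -> bool:
--     """Classify the word in one aggregate fold, then decide with a closed boolean formula.
--
--     Instead of staged early-return guards, we accumulate: the length, whether a
--     lowercase letter occurs, whether any cased (upper/lower) letter occurs, and
--     whether any digit or code/path marker character occurs. The final answer is
--     a single disjunction over these aggregates.  On ASCII input, word.isupper()
--     (with len > 1, subsumed by len >= 3) is exactly "some cased char and no
--     lowercase char".
--     """
--     n = 0
--     has_lower = False
--     has_cased = False
--     flagged = False
--     for c in word:
--         n += 1
--         if c.islower():
--             has_lower = True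
--             has_cased = True
--         elif c.isupper():
--             has_cased = True
--         if c.isdigit() or c in "_-/\\.":
--             flagged = True
--     return n < 3 or (has_cased and not has_lower) or flagged
-- ===== Notes on version B (the rewrite author's own statement) =====
-- stated objective: alternative
-- what changed: Replaces A's chain of staged early-return guards (isupper test, digit any-scan, five substring membership scans) with one aggregate fold that accumulates length, has_lower, has_cased and a marker flag, then decides by a single closed boolean formula with no isupper or substring calls.
import Mathlib
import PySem

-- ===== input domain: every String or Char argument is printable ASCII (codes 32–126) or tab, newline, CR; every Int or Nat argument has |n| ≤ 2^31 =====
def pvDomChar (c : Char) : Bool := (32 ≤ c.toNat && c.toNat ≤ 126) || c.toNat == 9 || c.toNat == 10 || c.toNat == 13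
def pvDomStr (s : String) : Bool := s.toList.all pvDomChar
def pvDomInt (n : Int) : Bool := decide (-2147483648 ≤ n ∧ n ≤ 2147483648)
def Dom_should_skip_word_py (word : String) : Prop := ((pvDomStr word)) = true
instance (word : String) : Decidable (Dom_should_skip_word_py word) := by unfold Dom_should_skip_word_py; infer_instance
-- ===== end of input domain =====

-- B replaces A's staged early-return guards (isupper check, digit any-scan, five substring scans)
-- by one aggregate fold over the characters plus a closed boolean formula (objective: alternative).

-- ===== PORT A =====
-- str.isupper() ported by hand (no PySem primitive): at least one cased character and
-- no lowercase character; exact on the ASCII domain, where cased = letters.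
def pyIsupperStr (cs : List Char) : Bool :=
  cs.any PySem.Chars.isupper && cs.all (fun c => !PySem.Chars.islower c)

def should_skip_word_py (word : String) : Bool :=
  if PySem.Str.len word < 3 then true
  else if pyIsupperStr word.toList && PySem.Str.len word > 1 then true
  else if word.toList.any PySem.Chars.isdigit then true            -- any(c.isdigit() for c in word)
  else if PySem.Str.isIn "_" word || PySem.Str.isIn "-" word then true
  else if PySem.Str.isIn "/" word || PySem.Str.isIn "\\" word || PySem.Str.isIn "." word then true
  else false

-- ===== PORT B =====
-- the marker characters "_-/\\." of Source B, as the list of their characters (c in "_-/\\.")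
def altMarkers : List Char := ['_', '-', '/', '\\', '.']

-- one step of Source B's aggregate fold: state = (n, has_lower, has_cased, flagged)
def altStep (st : Int × Bool × Bool × Bool) (c : Char) : Int × Bool × Bool × Bool :=
  let lc := if PySem.Chars.islower c then (true, true)
            else if PySem.Chars.isupper c then (st.2.1, true)
            else (st.2.1, st.2.2.1)
  let fl := if PySem.Chars.isdigit c || altMarkers.contains c then true else st.2.2.2
  (st.1 + 1, lc.1, lc.2, fl)

def should_skip_word_py_alt (word : String) : Bool :=
  let st := word.toList.foldl altStep (0, false, false, false)
  decide (st.1 < 3) || (st.2.2.1 && !st.2.1) || st.2.2.2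

-- ===== PRECONDITION & SPEC =====
def Spec_should_skip_word_py (word : String) (out : Bool) : Prop := out = should_skip_word_py_alt word
instance (word : String) (out : Bool) : Decidable (Spec_should_skip_word_py word out) := by unfold Spec_should_skip_word_py; infer_instance

-- ===== CLAIM (what is proved, stated in full; the proofs are below) =====
def Claim_equal_should_skip_word_py : Prop := ∀ (word : String), Dom_should_skip_word_py word → Spec_should_skip_word_py word (should_skip_word_py word)

-- ===== LEMMAS AND PROOFS =====

-- the fold computes the length and three any-aggregates
theorem altFold_eq (cs : List Char) (n : Int) (hl hc fl : Bool) :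
    cs.foldl altStep (n, hl, hc, fl) =
      (n + cs.length,
       hl || cs.any PySem.Chars.islower,
       hc || cs.any (fun c => PySem.Chars.islower c || PySem.Chars.isupper c),
       fl || cs.any (fun c => PySem.Chars.isdigit c || altMarkers.contains c)) := by
  induction cs generalizing n hl hc fl with
  | nil => simp
  | cons c rest ih =>
    simp only [List.foldl_cons, altStep, ih, List.any_cons, List.length_cons]
    refine Prod.ext (by push_cast; ring) (Prod.ext ?_ (Prod.ext ?_ ?_)) <;>
      split_ifs with h1 h2 <;> simp_all

theorem anyOr (l : List Char) (p q : Char → Bool) :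
    l.any (fun c => p c || q c) = (l.any p || l.any q) := by
  induction l with
  | nil => rfl
  | cons c rest ih => simp only [List.any_cons, ih]; cases p c <;> cases q c <;> simp

theorem contains_eq_any (l : List Char) (a : Char) : l.contains a = l.any (· == a) := by
  induction l with
  | nil => rfl
  | cons c rest ih =>
    simp only [List.any_cons, ← ih, List.contains_cons]
    cases h : a == c
    · simp_all [BEq.comm]
    · simp at h; simp [h]

theorem isIn_single (a : Char) (w : String) (u : String) (hu : u.toList = [a]) :
    PySem.Str.isIn u w = w.toList.contains a := by
  by_cases h : a ∈ w.toList
  · have : u.toList <:+: w.toList := by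
      obtain ⟨s, t, heq⟩ := List.append_of_mem h
      exact ⟨s, t, by simp [heq, hu]⟩
    rw [(PySem.Str.isIn_iff_infix _ _).mpr this]
    simp [h]
  · rw [List.contains_eq_mem]
    simp only [h, decide_false]
    rw [← Bool.not_eq_true]
    intro hin
    have := (PySem.Str.isIn_iff_infix _ _).mp hin
    rw [hu] at this
    exact h (List.singleton_sublist.mp this.sublist)

-- membership in the marker list expands to five equality tests
theorem contains_markers (c : Char) :
    altMarkers.contains c = (c == '_' || c == '-' || c == '/' || c == '\\' || c == '.') := by
  rw [contains_eq_any]; simp only [altMarkers, List.any_cons, List.any_nil, Bool.or_false, BEq.comm]; simp [Bool.or_assoc]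

-- A's three trailing scans equal B's flagged aggregate
theorem tail_eq (word : String) :
    (if word.toList.any PySem.Chars.isdigit then true
     else if PySem.Str.isIn "_" word || PySem.Str.isIn "-" word then true
     else if PySem.Str.isIn "/" word || PySem.Str.isIn "\\" word || PySem.Str.isIn "." word then true
     else false)
    = word.toList.any (fun c => PySem.Chars.isdigit c || altMarkers.contains c) := by
  have hm : (fun c => PySem.Chars.isdigit c || altMarkers.contains c) =
      fun c => PySem.Chars.isdigit c ||
        ((· == '_') c || ((· == '-') c || ((· == '/') c || ((· == '\\') c || (· == '.') c)))) := by
    funext c; rw [contains_markers]; cases PySem.Chars.isdigit c <;> simp [Bool.or_assoc]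
  rw [hm, anyOr, anyOr, anyOr, anyOr, anyOr]
  rw [isIn_single '_' word "_" rfl, isIn_single '-' word "-" rfl,
      isIn_single '/' word "/" rfl, isIn_single '\\' word "\\" rfl,
      isIn_single '.' word "." rfl]
  simp only [contains_eq_any, Bool.if_true_left, Bool.if_false_right, Bool.or_assoc,
    Bool.and_true, Bool.decide_eq_true]

-- ===== VERDICT (by name: the statement is the Claim_ definition above) =====
theorem should_skip_word_py_spec : Claim_equal_should_skip_word_py := by
  intro word _
  unfold Spec_should_skip_word_py should_skip_word_py should_skip_word_py_alt
  rw [altFold_eq]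
  simp only [PySem.Str.len_eq, zero_add]
  by_cases h3 : (word.toList.length : Int) < 3
  · simp only [h3, decide_true, Bool.true_or]
    simp
  · have h1 : (word.toList.length : Int) > 1 := by omega
    simp only [h3, h1, decide_true, decide_false, Bool.false_or, Bool.and_true]
    rw [tail_eq]
    unfold pyIsupperStr
    rw [anyOr]
    have hall : word.toList.all (fun c => !PySem.Chars.islower c)
        = !word.toList.any PySem.Chars.islower := by
      simp [List.all_eq_not_any_not]
    rw [hall]
    rw [anyOr]
    cases hl : word.toList.any PySem.Chars.islower <;>
    cases hu : word.toList.any PySem.Chars.isupper <;>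
    cases hd : word.toList.any PySem.Chars.isdigit <;>
    cases hm : word.toList.any altMarkers.contains <;>
      decide
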